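-- pv_equiv track=rewrite | github.com/addy20/Python-Programs | MinorAssignment6/Q9f.py | count
-- ===== SOURCE A (Python) =====
-- def count(str):
--     str=str.lower()
--     mstr=set(str)
--     v=0
--     c=0
--     for i in mstr:
--         if(i in 'aeiou'):
--             v+=1
--         else:
--             c+=1
--     return v,c
-- ===== SOURCE B (Python) =====
-- def count(str):
--     chars = set(str.lower())
--     v = sum(1 for ch in 'aeiou' if ch in chars)
--     return v, len(chars) - v
-- ===== Notes on version B (the rewrite author's own statement) =====
-- stated objective: idiomatic
-- what changed: Instead of classifying every distinct character of the input in a loop with two counters, B iterates over the five vowels testing membership in the character set and gets the consonant count by subtraction from the set's size.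
import Mathlib
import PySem

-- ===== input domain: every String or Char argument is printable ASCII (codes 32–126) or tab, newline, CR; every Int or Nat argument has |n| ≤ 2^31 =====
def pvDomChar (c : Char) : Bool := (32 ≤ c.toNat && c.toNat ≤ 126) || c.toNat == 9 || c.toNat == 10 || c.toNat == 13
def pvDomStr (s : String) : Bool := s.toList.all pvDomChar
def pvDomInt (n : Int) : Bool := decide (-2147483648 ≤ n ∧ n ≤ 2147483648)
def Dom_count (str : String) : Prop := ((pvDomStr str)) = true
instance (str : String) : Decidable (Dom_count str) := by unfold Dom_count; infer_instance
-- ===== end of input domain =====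

-- B replaces the per-character classification loop with a loop over the five vowels
-- and gets the consonant count by subtraction from the set's size (idiomatic rewrite).

-- ===== PORT A =====
def count (str : String) : Int × Int :=
  let str' := PySem.Str.lower str
  let mstr : PySem.Set Char := PySem.Set.ofList str'.toList
  let vc : Int × Int := mstr.foldl
    (fun (vc : Int × Int) i =>
      if ("aeiou".toList.contains i) then (vc.1 + 1, vc.2) else (vc.1, vc.2 + 1))
    (0, 0)
  vc

-- ===== PORT B =====
def count_alt (str : String) : Int × Int :=
  let chars : PySem.Set Char := PySem.Set.ofList (PySem.Str.lower str).toList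
  let v : Int := "aeiou".toList.foldl
    (fun (acc : Int) ch => if PySem.Set.contains chars ch then acc + 1 else acc) 0
  (v, PySem.Set.len chars - v)

-- ===== PRECONDITION & SPEC =====
def Spec_count (str : String) (out : Int × Int) : Prop := out = count_alt str
instance (str : String) (out : Int × Int) : Decidable (Spec_count str out) := by unfold Spec_count; infer_instance

-- ===== CLAIM (what is proved, stated in full; the proofs are below) =====
def Claim_equal_count : Prop := ∀ (str : String), Dom_count str → Spec_count str (count str)

-- ===== LEMMAS AND PROOFS =====

-- A's loop computes (countP vowel, countP non-vowel) over the set's elements.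
theorem foldl_classify (p : Char → Bool) (s : List Char) (v c : Int) :
    s.foldl (fun (vc : Int × Int) i => if p i then (vc.1 + 1, vc.2) else (vc.1, vc.2 + 1)) (v, c)
      = (v + (s.countP p : Int), c + (s.countP (fun x => !p x) : Int)) := by
  induction s generalizing v c with
  | nil => simp
  | cons hd tl ih =>
    rw [List.foldl_cons]
    by_cases h : p hd = true
    · rw [if_pos h, ih, List.countP_cons, List.countP_cons]
      simp only [h, Bool.not_true, if_true]
      push_cast
      ring_nf
    · rw [if_neg h, ih, List.countP_cons, List.countP_cons]
      simp only [h, Bool.not_eq_true] at *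
      simp only [Bool.not_false, if_true]
      push_cast
      ring_nf

-- B's loop computes countP (membership in the set) over the vowel list.
theorem foldl_count_mem (s : PySem.Set Char) (t : List Char) (v : Int) :
    t.foldl (fun (acc : Int) ch => if PySem.Set.contains s ch then acc + 1 else acc) v
      = v + (t.countP (fun ch => PySem.Set.contains s ch) : Int) := by
  induction t generalizing v with
  | nil => simp
  | cons hd tl ih =>
    rw [List.foldl_cons, ih, List.countP_cons]
    by_cases h : PySem.Set.contains s hd = true
    · simp only [h, if_true]
      push_cast
      ring_nf
    · simp only [h]
      push_cast
      ring_nf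

theorem set_contains_eq (u : List Char) (x : Char) :
    PySem.Set.contains u x = u.contains x := by
  simp [PySem.Set.contains]

-- Double counting: for nodup lists, |{x ∈ s | x ∈ t}| = |{x ∈ t | x ∈ s}|.
theorem countP_comm (s t : List Char) (hs : s.Nodup) (ht : t.Nodup) :
    s.countP (fun x => t.contains x) = t.countP (fun x => s.contains x) := by
  rw [List.countP_eq_length_filter, List.countP_eq_length_filter]
  have h1 : (s.filter (fun x => t.contains x)).toFinset = s.toFinset ∩ t.toFinset := by
    ext x; simp
  have h2 : (t.filter (fun x => s.contains x)).toFinset = t.toFinset ∩ s.toFinset := by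
    ext x; simp
  calc (s.filter (fun x => t.contains x)).length
      = (s.filter (fun x => t.contains x)).toFinset.card :=
        (List.toFinset_card_of_nodup (hs.filter _)).symm
    _ = (t.filter (fun x => s.contains x)).toFinset.card := by
        rw [h1, h2, Finset.inter_comm]
    _ = (t.filter (fun x => s.contains x)).length :=
        List.toFinset_card_of_nodup (ht.filter _)

theorem countP_split (p : Char → Bool) (s : List Char) :
    s.countP p + s.countP (fun x => !p x) = s.length := by
  induction s with
  | nil => simp
  | cons hd tl ih =>
    rw [List.countP_cons, List.countP_cons, List.length_cons]
    by_cases h : p hd = true <;> simp [h] <;> omega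

theorem set_len_eq (s : PySem.Set Char) : PySem.Set.len s = (s.length : Int) := rfl

theorem count_eq_alt (str : String) : count str = count_alt str := by
  unfold count count_alt
  simp only [foldl_classify, foldl_count_mem]
  have hnd : (PySem.Set.ofList (PySem.Str.lower str).toList).Nodup := PySem.Set.nodup_ofList _
  have hv : ("aeiou".toList).Nodup := by decide
  set s : PySem.Set Char := PySem.Set.ofList (PySem.Str.lower str).toList with hsdef
  have hcc : s.countP (fun x => "aeiou".toList.contains x)
      = "aeiou".toList.countP (fun ch => PySem.Set.contains s ch) := by
    rw [countP_comm s "aeiou".toList hnd hv]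
    exact List.countP_congr (fun x _ => by rw [set_contains_eq])
  have hsplit := countP_split (fun x => "aeiou".toList.contains x) s
  rw [Prod.ext_iff]
  refine ⟨?_, ?_⟩
  · simp only [hcc]
  · rw [set_len_eq]
    omega

-- ===== VERDICT (by name: the statement is the Claim_ definition above) =====
theorem count_spec : Claim_equal_count := by
  intro str _
  unfold Spec_count
  exact count_eq_alt str
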